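-- pv_equiv track=rewrite | github.com/akshaysanjeevk/SysBio-course | three-node-search.py | get_triad_type
-- ===== SOURCE A (Python) =====
-- def get_triad_type(edges):
--     """
--     Determine the triad type based on the edges between three nodes.
--     Returns an ID number for the triad pattern (0-15 for all possible configurations).
--     """
--     # Each triad can be represented as a 6-bit binary number
--     # where each bit represents the presence (1) or absence (0) of an edge
--     # The order is: AB, BA, AC, CA, BC, CB
--     binary = 0
--     edge_positions = {'01': 0, '10': 1, '02': 2, '20': 3, '12': 4, '21': 5}
--
--     for edge in edges:
--         src, dst = edge
--         key = f"{src}{dst}"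
--         if key in edge_positions:
--             binary |= (1 << (5 - edge_positions[key]))  # Set the corresponding bit
--
--     return binary
-- ===== SOURCE B (Python) =====
-- def get_triad_type(edges):
--     """
--     Determine the triad type based on the edges between three nodes.
--     Returns an ID number for the triad pattern (0-15 for all possible configurations).
--     """
--     present = {f"{src}{dst}" for src, dst in edges}
--     binary = 0
--     for i, key in enumerate(['01', '10', '02', '20', '12', '21']):
--         if key in present:
--             binary |= (1 << (5 - i))
--     return binary
-- ===== Notes on version B (the rewrite author's own statement) =====
-- stated objective: alternative
-- what changed: B inverts the traversal: it builds a set of present edge keys once, then loops over the fixed 6-entry ordered position table testing membership, instead of looping over the input edges and looking each key up in a position dict; OR-on-duplicates is absorbed by the set.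
import Mathlib
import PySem

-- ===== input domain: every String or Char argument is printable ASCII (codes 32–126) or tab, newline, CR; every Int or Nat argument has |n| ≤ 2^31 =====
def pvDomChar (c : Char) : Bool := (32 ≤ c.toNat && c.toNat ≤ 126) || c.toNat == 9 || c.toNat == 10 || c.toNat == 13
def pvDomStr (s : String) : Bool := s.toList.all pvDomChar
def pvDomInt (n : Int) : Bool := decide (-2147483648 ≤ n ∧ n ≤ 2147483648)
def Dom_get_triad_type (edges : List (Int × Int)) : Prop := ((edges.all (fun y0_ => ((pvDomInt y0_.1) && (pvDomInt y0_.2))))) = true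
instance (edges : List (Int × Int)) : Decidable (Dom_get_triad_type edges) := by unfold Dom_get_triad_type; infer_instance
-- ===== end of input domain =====

-- B inverts the traversal: it builds the set of present edge keys once and loops over the
-- fixed 6-entry position table testing membership, instead of looping over the input edges
-- and looking each key up in a position dict (objective: alternative, same cost).

-- ===== PORT A =====
-- the f-string key f"{src}{dst}" is ported as char-list concatenation of str(src) and
-- str(dst) (PySem.Int.toChars is exact str(n)); the dict is keyed by those char lists
def pvEdgePositions : PySem.Dict (List Char) Int :=
  PySem.Dict.ofList [(['0','1'], 0), (['1','0'], 1), (['0','2'], 2), (['2','0'], 3), (['1','2'], 4), (['2','1'], 5)]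

def get_triad_type (edges : List (Int × Int)) : Int :=
  edges.foldl
    (fun binary edge =>
      let key := PySem.Int.toChars edge.1 ++ PySem.Int.toChars edge.2
      match PySem.Dict.get? pvEdgePositions key with
      -- the dict's values p are 0..5, so (5 - p).toNat is exactly Python's shift 5 - p ≥ 0
      | some p => PySem.Int.bor binary ((1 : Int) <<< (5 - p).toNat)
      | none => binary)
    0

-- ===== PORT B =====
def pvTriadTable : List (List Char) :=
  [['0','1'], ['1','0'], ['0','2'], ['2','0'], ['1','2'], ['2','1']]

def get_triad_type_alt (edges : List (Int × Int)) : Int :=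
  let present : PySem.Set (List Char) :=
    PySem.Set.ofList (edges.map (fun e => PySem.Int.toChars e.1 ++ PySem.Int.toChars e.2))
  (PySem.List.enumerate pvTriadTable).foldl
    (fun binary ik =>
      -- enumerate indices i are 0..5, so (5 - i).toNat is exactly Python's shift 5 - i ≥ 0
      if PySem.Set.contains present ik.2 then PySem.Int.bor binary ((1 : Int) <<< (5 - ik.1).toNat)
      else binary)
    0

-- ===== PRECONDITION & SPEC =====
def Spec_get_triad_type (edges : List (Int × Int)) (out : Int) : Prop := out = get_triad_type_alt edges
instance (edges : List (Int × Int)) (out : Int) : Decidable (Spec_get_triad_type edges out) := by unfold Spec_get_triad_type; infer_instance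

-- ===== CLAIM (what is proved, stated in full; the proofs are below) =====
def Claim_equal_get_triad_type : Prop := ∀ (edges : List (Int × Int)), Dom_get_triad_type edges → Spec_get_triad_type edges (get_triad_type edges)

-- ===== LEMMAS AND PROOFS =====

def pvKeyOf (e : Int × Int) : List Char := PySem.Int.toChars e.1 ++ PySem.Int.toChars e.2

-- A's per-edge contribution, over Nat
def pvBitA (e : Int × Int) : Nat :=
  match PySem.Dict.get? pvEdgePositions (pvKeyOf e) with
  | some p => 1 <<< (5 - p).toNat
  | none => 0

-- Nat-valued mirror of A's fold
def pvMaskA (edges : List (Int × Int)) : Nat :=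
  edges.foldl (fun m e => m ||| pvBitA e) 0

-- Nat-valued mirror of B's result
def pvMaskB (edges : List (Int × Int)) : Nat :=
  (if ['0','1'] ∈ edges.map pvKeyOf then 32 else 0) |||
  (if ['1','0'] ∈ edges.map pvKeyOf then 16 else 0) |||
  (if ['0','2'] ∈ edges.map pvKeyOf then 8 else 0) |||
  (if ['2','0'] ∈ edges.map pvKeyOf then 4 else 0) |||
  (if ['1','2'] ∈ edges.map pvKeyOf then 2 else 0) |||
  (if ['2','1'] ∈ edges.map pvKeyOf then 1 else 0)

theorem pv_shl_cast (k : Nat) : ((1 : Int) <<< k) = ((1 <<< k : Nat) : Int) := by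
  rw [Int.shiftLeft_eq, Nat.shiftLeft_eq]
  push_cast
  ring

theorem pv_get_none (k : List Char) (h1 : ¬ k = ['0','1']) (h2 : ¬ k = ['1','0'])
    (h3 : ¬ k = ['0','2']) (h4 : ¬ k = ['2','0']) (h5 : ¬ k = ['1','2']) (h6 : ¬ k = ['2','1']) :
    PySem.Dict.get? pvEdgePositions k = none := by
  have hitems : pvEdgePositions.items =
      [(['0','1'], (0:Int)), (['1','0'], 1), (['0','2'], 2), (['2','0'], 3), (['1','2'], 4), (['2','1'], 5)] := by decide
  simp [PySem.Dict.get?, hitems]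
  exact ⟨fun h => h1 h.symm, fun h => h2 h.symm, fun h => h3 h.symm,
    fun h => h4 h.symm, fun h => h5 h.symm, fun h => h6 h.symm⟩

theorem pv_A_eq_maskA (edges : List (Int × Int)) : get_triad_type edges = (pvMaskA edges : Int) := by
  unfold get_triad_type pvMaskA
  have hfun : (fun (binary : Int) (edge : Int × Int) =>
      let key := PySem.Int.toChars edge.1 ++ PySem.Int.toChars edge.2
      match PySem.Dict.get? pvEdgePositions key with
      | some p => PySem.Int.bor binary ((1 : Int) <<< (5 - p).toNat)
      | none => binary)
      = (fun (binary : Int) (edge : Int × Int) =>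
      match PySem.Dict.get? pvEdgePositions (pvKeyOf edge) with
      | some p => PySem.Int.bor binary ((1 : Int) <<< (5 - p).toNat)
      | none => binary) := rfl
  rw [hfun]
  suffices h : ∀ (m : Nat),
      edges.foldl
        (fun (binary : Int) (edge : Int × Int) =>
          match PySem.Dict.get? pvEdgePositions (pvKeyOf edge) with
          | some p => PySem.Int.bor binary ((1 : Int) <<< (5 - p).toNat)
          | none => binary)
        (m : Int)
      = ((edges.foldl (fun m e => m ||| pvBitA e) m : Nat) : Int) by
    simpa using h 0
  induction edges with
  | nil => intro m; simp
  | cons e es ih =>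
      intro m
      simp only [List.foldl_cons]
      have hstep :
          (match PySem.Dict.get? pvEdgePositions (pvKeyOf e) with
           | some p => PySem.Int.bor (m : Int) ((1 : Int) <<< (5 - p).toNat)
           | none => (m : Int))
          = ((m ||| pvBitA e : Nat) : Int) := by
        unfold pvBitA
        cases h : PySem.Dict.get? pvEdgePositions (pvKeyOf e) with
        | none => simp
        | some p =>
            simp only []
            rw [pv_shl_cast, PySem.Int.bor_natCast]
      rw [hstep, ih]

set_option maxHeartbeats 1000000 in
theorem pv_B_eq_maskB (edges : List (Int × Int)) :
    get_triad_type_alt edges = (pvMaskB edges : Int) := by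
  have henum : PySem.List.enumerate pvTriadTable =
      [((0:Int),['0','1']), (1,['1','0']), (2,['0','2']), (3,['2','0']), (4,['1','2']), (5,['2','1'])] := rfl
  unfold get_triad_type_alt pvMaskB
  rw [henum]
  simp only [List.foldl_cons, List.foldl_nil,
    show (fun (e : Int × Int) => PySem.Int.toChars e.1 ++ PySem.Int.toChars e.2) = pvKeyOf from rfl]
  by_cases c1 : (['0','1'] : List Char) ∈ edges.map pvKeyOf <;>
  by_cases c2 : (['1','0'] : List Char) ∈ edges.map pvKeyOf <;>
  by_cases c3 : (['0','2'] : List Char) ∈ edges.map pvKeyOf <;>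
  by_cases c4 : (['2','0'] : List Char) ∈ edges.map pvKeyOf <;>
  by_cases c5 : (['1','2'] : List Char) ∈ edges.map pvKeyOf <;>
  by_cases c6 : (['2','1'] : List Char) ∈ edges.map pvKeyOf <;>
    (simp [PySem.Set.mem_ofList, c1, c2, c3, c4, c5, c6]; try decide)

theorem pv_maskA_cons (e : Int × Int) (es : List (Int × Int)) :
    pvMaskA (e :: es) = pvBitA e ||| pvMaskA es := by
  unfold pvMaskA
  simp only [List.foldl_cons]
  suffices h : ∀ (l : List (Int × Int)) (m : Nat),
      l.foldl (fun m e => m ||| pvBitA e) m = m ||| l.foldl (fun m e => m ||| pvBitA e) 0 by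
    rw [h es (0 ||| pvBitA e)]
    simp
  intro l
  induction l with
  | nil => intro m; simp
  | cons x xs ih =>
      intro m
      simp only [List.foldl_cons]
      rw [ih (m ||| pvBitA x), ih (0 ||| pvBitA x)]
      simp [Nat.lor_assoc]

theorem pv_mask_eq (edges : List (Int × Int)) : pvMaskA edges = pvMaskB edges := by
  induction edges with
  | nil => decide
  | cons e es ih =>
      rw [pv_maskA_cons, ih]
      unfold pvMaskB
      simp only [List.map_cons, List.mem_cons]
      by_cases h1 : pvKeyOf e = ['0','1']
      · have hb : pvBitA e = 32 := by unfold pvBitA; rw [h1]; decide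
        rw [hb]
        by_cases c1 : (['0','1'] : List Char) ∈ es.map pvKeyOf <;>
        by_cases c2 : (['1','0'] : List Char) ∈ es.map pvKeyOf <;>
        by_cases c3 : (['0','2'] : List Char) ∈ es.map pvKeyOf <;>
        by_cases c4 : (['2','0'] : List Char) ∈ es.map pvKeyOf <;>
        by_cases c5 : (['1','2'] : List Char) ∈ es.map pvKeyOf <;>
        by_cases c6 : (['2','1'] : List Char) ∈ es.map pvKeyOf <;>
          (simp [h1, c1, c2, c3, c4, c5, c6]; try decide)
      · by_cases h2 : pvKeyOf e = ['1','0']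
        · have hb : pvBitA e = 16 := by unfold pvBitA; rw [h2]; decide
          rw [hb]
          by_cases c1 : (['0','1'] : List Char) ∈ es.map pvKeyOf <;>
          by_cases c2 : (['1','0'] : List Char) ∈ es.map pvKeyOf <;>
          by_cases c3 : (['0','2'] : List Char) ∈ es.map pvKeyOf <;>
          by_cases c4 : (['2','0'] : List Char) ∈ es.map pvKeyOf <;>
          by_cases c5 : (['1','2'] : List Char) ∈ es.map pvKeyOf <;>
          by_cases c6 : (['2','1'] : List Char) ∈ es.map pvKeyOf <;>
            (simp [h2, c1, c2, c3, c4, c5, c6]; try decide)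
        · by_cases h3 : pvKeyOf e = ['0','2']
          · have hb : pvBitA e = 8 := by unfold pvBitA; rw [h3]; decide
            rw [hb]
            by_cases c1 : (['0','1'] : List Char) ∈ es.map pvKeyOf <;>
            by_cases c2 : (['1','0'] : List Char) ∈ es.map pvKeyOf <;>
            by_cases c3 : (['0','2'] : List Char) ∈ es.map pvKeyOf <;>
            by_cases c4 : (['2','0'] : List Char) ∈ es.map pvKeyOf <;>
            by_cases c5 : (['1','2'] : List Char) ∈ es.map pvKeyOf <;>
            by_cases c6 : (['2','1'] : List Char) ∈ es.map pvKeyOf <;>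
              (simp [h3, c1, c2, c3, c4, c5, c6]; try decide)
          · by_cases h4 : pvKeyOf e = ['2','0']
            · have hb : pvBitA e = 4 := by unfold pvBitA; rw [h4]; decide
              rw [hb]
              by_cases c1 : (['0','1'] : List Char) ∈ es.map pvKeyOf <;>
              by_cases c2 : (['1','0'] : List Char) ∈ es.map pvKeyOf <;>
              by_cases c3 : (['0','2'] : List Char) ∈ es.map pvKeyOf <;>
              by_cases c4 : (['2','0'] : List Char) ∈ es.map pvKeyOf <;>
              by_cases c5 : (['1','2'] : List Char) ∈ es.map pvKeyOf <;>
              by_cases c6 : (['2','1'] : List Char) ∈ es.map pvKeyOf <;>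
                (simp [h4, c1, c2, c3, c4, c5, c6]; try decide)
            · by_cases h5 : pvKeyOf e = ['1','2']
              · have hb : pvBitA e = 2 := by unfold pvBitA; rw [h5]; decide
                rw [hb]
                by_cases c1 : (['0','1'] : List Char) ∈ es.map pvKeyOf <;>
                by_cases c2 : (['1','0'] : List Char) ∈ es.map pvKeyOf <;>
                by_cases c3 : (['0','2'] : List Char) ∈ es.map pvKeyOf <;>
                by_cases c4 : (['2','0'] : List Char) ∈ es.map pvKeyOf <;>
                by_cases c5 : (['1','2'] : List Char) ∈ es.map pvKeyOf <;>
                by_cases c6 : (['2','1'] : List Char) ∈ es.map pvKeyOf <;>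
                  (simp [h5, c1, c2, c3, c4, c5, c6]; try decide)
              · by_cases h6 : pvKeyOf e = ['2','1']
                · have hb : pvBitA e = 1 := by unfold pvBitA; rw [h6]; decide
                  rw [hb]
                  by_cases c1 : (['0','1'] : List Char) ∈ es.map pvKeyOf <;>
                  by_cases c2 : (['1','0'] : List Char) ∈ es.map pvKeyOf <;>
                  by_cases c3 : (['0','2'] : List Char) ∈ es.map pvKeyOf <;>
                  by_cases c4 : (['2','0'] : List Char) ∈ es.map pvKeyOf <;>
                  by_cases c5 : (['1','2'] : List Char) ∈ es.map pvKeyOf <;>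
                  by_cases c6 : (['2','1'] : List Char) ∈ es.map pvKeyOf <;>
                    (simp [h6, c1, c2, c3, c4, c5, c6]; try decide)
                · -- unrecognized key: no bit from e, no new membership
                  have hb : pvBitA e = 0 := by
                    unfold pvBitA
                    rw [pv_get_none _ h1 h2 h3 h4 h5 h6]
                  rw [hb]
                  have n1 : ¬(['0','1'] : List Char) = pvKeyOf e := fun h => h1 h.symm
                  have n2 : ¬(['1','0'] : List Char) = pvKeyOf e := fun h => h2 h.symm
                  have n3 : ¬(['0','2'] : List Char) = pvKeyOf e := fun h => h3 h.symm
                  have n4 : ¬(['2','0'] : List Char) = pvKeyOf e := fun h => h4 h.symm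
                  have n5 : ¬(['1','2'] : List Char) = pvKeyOf e := fun h => h5 h.symm
                  have n6 : ¬(['2','1'] : List Char) = pvKeyOf e := fun h => h6 h.symm
                  simp only [eq_false n1, eq_false n2, eq_false n3, eq_false n4, eq_false n5,
                    eq_false n6, false_or]
                  simp

-- ===== VERDICT (by name: the statement is the Claim_ definition above) =====
theorem get_triad_type_spec : Claim_equal_get_triad_type := by
  intro edges _
  unfold Spec_get_triad_type
  rw [pv_A_eq_maskA, pv_B_eq_maskB, pv_mask_eq]
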